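-- pv_equiv track=rewrite | github.com/samek571/advent-of-code | 2017/11/11.py | fx
-- ===== SOURCE A (Python) =====
-- def fx(moves):
--     x=0
--     y=0
--     for i in moves:
--         if i == "ne":
--             y += 1
--         if i == "se":
--             x += 1
--         if i == "n":
--             y += 1
--             x -= 1
--         if i == "s":
--             x += 1
--             y -= 1
--         if i == "nw":
--             x -= 1
--         if i == "sw":
--             y -= 1
--     return x
-- ===== SOURCE B (Python) =====
-- def fx(moves):
--     return moves.count("se") + moves.count("s") - moves.count("n") - moves.count("nw")
-- ===== Notes on version B (the rewrite author's own statement) =====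
-- stated objective: simpler
-- what changed: Replaces the accumulator loop with branch cascade (including the dead y accumulator and the ne/sw branches that never affect x) by a closed-form expression over four move counts.
import Mathlib
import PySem

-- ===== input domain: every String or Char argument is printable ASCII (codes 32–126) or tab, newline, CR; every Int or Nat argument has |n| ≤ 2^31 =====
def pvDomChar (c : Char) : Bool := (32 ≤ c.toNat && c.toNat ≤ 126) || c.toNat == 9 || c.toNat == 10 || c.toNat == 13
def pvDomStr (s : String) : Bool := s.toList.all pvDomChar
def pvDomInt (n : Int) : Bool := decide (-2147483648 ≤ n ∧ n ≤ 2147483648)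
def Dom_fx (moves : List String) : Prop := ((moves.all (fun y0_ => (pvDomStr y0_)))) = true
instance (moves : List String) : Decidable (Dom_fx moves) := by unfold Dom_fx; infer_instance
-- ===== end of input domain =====

-- B replaces A's accumulator loop (with its dead y accumulator) by a closed-form sum of four move counts (objective: simpler).

-- ===== PORT A =====
def fxStep (xy : Int × Int) (i : String) : Int × Int :=
  let xy := if i == "ne" then (xy.1, xy.2 + 1) else xy
  let xy := if i == "se" then (xy.1 + 1, xy.2) else xy
  let xy := if i == "n" then (xy.1 - 1, xy.2 + 1) else xy
  let xy := if i == "s" then (xy.1 + 1, xy.2 - 1) else xy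
  let xy := if i == "nw" then (xy.1 - 1, xy.2) else xy
  let xy := if i == "sw" then (xy.1, xy.2 - 1) else xy
  xy

def fx (moves : List String) : Int :=
  (moves.foldl fxStep (0, 0)).1

-- ===== PORT B =====
def fx_alt (moves : List String) : Int :=
  (PySem.List.count moves "se" : Int) + PySem.List.count moves "s"
    - PySem.List.count moves "n" - PySem.List.count moves "nw"

-- ===== PRECONDITION & SPEC =====
def Spec_fx (moves : List String) (out : Int) : Prop := out = fx_alt moves
instance (moves : List String) (out : Int) : Decidable (Spec_fx moves out) := by unfold Spec_fx; infer_instance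

-- ===== CLAIM (what is proved, stated in full; the proofs are below) =====
def Claim_equal_fx : Prop := ∀ (moves : List String), Dom_fx moves → Spec_fx moves (fx moves)

-- ===== LEMMAS AND PROOFS =====
theorem fx_fold_eq (moves : List String) : ∀ (x y : Int),
    (moves.foldl fxStep (x, y)).1
      = x + (PySem.List.count moves "se" : Int) + PySem.List.count moves "s"
          - PySem.List.count moves "n" - PySem.List.count moves "nw" := by
  induction moves with
  | nil => intro x y; simp [PySem.List.count]
  | cons h t ih =>
      intro x y
      simp only [List.foldl_cons]
      rcases hstep : fxStep (x, y) h with ⟨a, b⟩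
      rw [ih a b]
      have hcnt : ∀ s : String, (PySem.List.count (h :: t) s : Int)
          = (if h == s then 1 else 0) + PySem.List.count t s := by
        intro s
        simp [PySem.List.count, List.count_cons]
        split <;> omega
      rw [hcnt, hcnt, hcnt, hcnt]
      unfold fxStep at hstep
      by_cases h1 : h = "ne" <;> by_cases h2 : h = "se" <;> by_cases h3 : h = "n"
        <;> by_cases h4 : h = "s" <;> by_cases h5 : h = "nw" <;> by_cases h6 : h = "sw"
        <;> simp_all <;> omega

-- ===== VERDICT (by name: the statement is the Claim_ definition above) =====
theorem fx_spec : Claim_equal_fx := by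
  intro moves _
  show fx moves = fx_alt moves
  unfold fx fx_alt
  rw [fx_fold_eq moves 0 0]
  ring
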